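-- pv_equiv track=rewrite | github.com/yogzz2023/AUGG22 | working aug 22.py | is_valid_hypothesis
-- ===== SOURCE A (Python) =====
-- def is_valid_hypothesis(hypothesis):
--     track_to_report = {}
--     report_used = set()
--
--     for track_idx, report_idx in hypothesis:
--         if report_idx >= 0:  # Skip the case where the report_idx is -1
--             if report_idx in report_used:
--                 return False  # Report is used more than once
--             report_used.add(report_idx)
--             if track_idx in track_to_report:
--                 return False  # Track is associated with more than one report
--             track_to_report[track_idx] = report_idx
--
--     return True
-- ===== SOURCE B (Python) =====
-- def is_valid_hypothesis(hypothesis):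
--     tracks = sorted(t for t, r in hypothesis if r >= 0)
--     reports = sorted(r for t, r in hypothesis if r >= 0)
--     def no_adjacent_dups(xs):
--         return all(a != b for a, b in zip(xs, xs[1:]))
--     return no_adjacent_dups(tracks) and no_adjacent_dups(reports)
-- ===== Notes on version B (the rewrite author's own statement) =====
-- stated objective: alternative
-- what changed: Replaces A's single-pass hash-based bookkeeping (dict/set membership with early return) by a sort-based check: sort the assigned track indices and the assigned report indices, then validity is the absence of equal adjacent elements in each sorted list.
import Mathlib
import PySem

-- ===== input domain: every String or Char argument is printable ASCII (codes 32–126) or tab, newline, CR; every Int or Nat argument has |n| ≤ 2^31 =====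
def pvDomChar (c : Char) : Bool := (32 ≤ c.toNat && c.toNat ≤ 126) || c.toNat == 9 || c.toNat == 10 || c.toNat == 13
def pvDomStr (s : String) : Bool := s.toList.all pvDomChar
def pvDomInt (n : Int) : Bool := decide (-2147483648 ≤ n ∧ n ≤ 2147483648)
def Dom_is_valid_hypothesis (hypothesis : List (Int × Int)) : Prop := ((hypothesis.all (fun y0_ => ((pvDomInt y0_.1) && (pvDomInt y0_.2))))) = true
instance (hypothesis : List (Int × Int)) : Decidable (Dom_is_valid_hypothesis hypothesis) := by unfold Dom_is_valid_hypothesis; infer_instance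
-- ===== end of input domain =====

-- B replaces A's hash-based dict/set bookkeeping by a sort-based duplicate check:
-- sort each projected index list and look for equal adjacent elements (objective: alternative).

-- ===== PORT A =====
-- the 'for track_idx, report_idx in hypothesis' loop with its early returns, state = (track_to_report, report_used)
def pvLoopA (xs : List (Int × Int)) (track_to_report : PySem.Dict Int Int)
    (report_used : PySem.Set Int) : Bool :=
  match xs with
  | [] => true
  | (track_idx, report_idx) :: rest =>
    if report_idx ≥ 0 then
      if PySem.Set.contains report_used report_idx then false
      else
        let report_used := PySem.Set.add report_used report_idx
        if track_to_report.contains track_idx then false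
        else pvLoopA rest (track_to_report.insert track_idx report_idx) report_used
    else pvLoopA rest track_to_report report_used

def is_valid_hypothesis (hypothesis : List (Int × Int)) : Bool :=
  pvLoopA hypothesis PySem.Dict.empty PySem.Set.empty

-- ===== PORT B =====
-- all(a != b for a, b in zip(xs, xs[1:]))  (xs[1:] on a list with nonnegative index = drop 1, exact)
def pvNoAdjDups (xs : List Int) : Bool :=
  (List.zip xs (xs.drop 1)).all (fun p => p.1 != p.2)

def is_valid_hypothesis_alt (hypothesis : List (Int × Int)) : Bool :=
  let tracks := PySem.List.sorted ((hypothesis.filter (fun p => p.2 ≥ 0)).map Prod.fst) (fun x => x) false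
  let reports := PySem.List.sorted ((hypothesis.filter (fun p => p.2 ≥ 0)).map Prod.snd) (fun x => x) false
  pvNoAdjDups tracks && pvNoAdjDups reports

-- ===== PRECONDITION & SPEC =====
def Spec_is_valid_hypothesis (hypothesis : List (Int × Int)) (out : Bool) : Prop := out = is_valid_hypothesis_alt hypothesis
instance (hypothesis : List (Int × Int)) (out : Bool) : Decidable (Spec_is_valid_hypothesis hypothesis out) := by unfold Spec_is_valid_hypothesis; infer_instance

-- ===== CLAIM =====
def Claim_equal_is_valid_hypothesis : Prop := ∀ (hypothesis : List (Int × Int)), Dom_is_valid_hypothesis hypothesis → Spec_is_valid_hypothesis hypothesis (is_valid_hypothesis hypothesis)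

-- ===== LEMMAS AND PROOFS =====

-- the assigned (report_idx >= 0) pairs
def pvAssigned (xs : List (Int × Int)) : List (Int × Int) :=
  xs.filter (fun p => decide (p.2 ≥ 0))

-- characterisation of A's loop for arbitrary state
lemma pv_loopA_eq (xs : List (Int × Int)) (d : PySem.Dict Int Int) (s : PySem.Set Int) :
    pvLoopA xs d s =
      decide (((pvAssigned xs).map Prod.fst).Nodup
        ∧ (∀ t ∈ (pvAssigned xs).map Prod.fst, d.contains t = false)
        ∧ ((pvAssigned xs).map Prod.snd).Nodup
        ∧ (∀ r ∈ (pvAssigned xs).map Prod.snd, r ∉ s)) := by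
  induction xs generalizing d s with
  | nil => simp [pvLoopA, pvAssigned]
  | cons p rest ih =>
    obtain ⟨t, r⟩ := p
    by_cases hr : r ≥ 0
    · rw [show pvLoopA ((t, r) :: rest) d s =
        (if PySem.Set.contains s r then false
         else if d.contains t then false
         else pvLoopA rest (d.insert t r) (PySem.Set.add s r)) from by
          simp [pvLoopA, hr]]
      by_cases hs : r ∈ s
      · rw [(PySem.Set.contains_iff _ _).mpr hs]
        simp only [if_true]
        symm
        rw [decide_eq_false_iff_not]
        rintro ⟨-, -, -, hall⟩
        exact hall r (by simp [pvAssigned, hr]) hs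
      · have hsc : PySem.Set.contains s r = false := by
          by_contra hne
          exact hs ((PySem.Set.contains_iff _ _).mp (by simpa using hne))
        rw [hsc]
        simp only [Bool.false_eq_true, if_false]
        by_cases hd : d.contains t = true
        · rw [hd]
          simp only [if_true]
          symm
          rw [decide_eq_false_iff_not]
          rintro ⟨-, hall, -, -⟩
          have := hall t (by simp [pvAssigned, hr])
          rw [hd] at this
          exact absurd this (by simp)
        · have hd' : d.contains t = false := by simpa using hd
          rw [hd']
          simp only [Bool.false_eq_true, if_false]
          rw [ih]
          rw [decide_eq_decide]
          simp only [pvAssigned, List.filter_cons, hr, decide_true, if_true, List.map_cons,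
            List.nodup_cons, List.mem_cons, PySem.Dict.contains_insert,
            PySem.Set.mem_add, forall_eq_or_imp]
          constructor
          · rintro ⟨hnd1, hall1, hnd2, hall2⟩
            refine ⟨⟨?_, hnd1⟩, ⟨hd', ?_⟩, ⟨?_, hnd2⟩, ⟨hs, ?_⟩⟩
            · intro hmem
              have := hall1 t hmem
              simp at this
            · intro t' hmem
              have := hall1 t' hmem
              simp only [Bool.or_eq_false_iff, beq_eq_false_iff_ne] at this
              exact this.2
            · intro hmem
              exact (hall2 r hmem) (Or.inr rfl)
            · intro r' hmem h
              exact (hall2 r' hmem) (Or.inl h)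
          · rintro ⟨⟨ht, hnd1⟩, ⟨-, hall1⟩, ⟨hrm, hnd2⟩, ⟨-, hall2⟩⟩
            refine ⟨hnd1, ?_, hnd2, ?_⟩
            · intro t' hmem
              simp only [Bool.or_eq_false_iff, beq_eq_false_iff_ne]
              exact ⟨fun h => ht (h ▸ hmem), hall1 t' hmem⟩
            · intro r' hmem
              rintro (h | h)
              · exact hall2 r' hmem h
              · exact hrm (h ▸ hmem)
    · rw [show pvLoopA ((t, r) :: rest) d s = pvLoopA rest d s from by simp [pvLoopA, hr]]
      rw [ih]
      congr 1
      simp [pvAssigned, hr]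

-- on a (≤)-sorted list, no equal adjacent elements ↔ no duplicates at all
lemma pv_noAdjDups_iff_nodup (l : List Int) (hl : l.Pairwise (· ≤ ·)) :
    pvNoAdjDups l = true ↔ l.Nodup := by
  induction l with
  | nil => simp [pvNoAdjDups]
  | cons a t ih =>
    cases t with
    | nil => simp [pvNoAdjDups]
    | cons b u =>
      have hab : a ≤ b := (List.pairwise_cons.mp hl).1 b (by simp)
      have hbu : ∀ x ∈ u, b ≤ x := fun x hx => (List.pairwise_cons.mp (List.pairwise_cons.mp hl).2).1 x hx
      have htl : (b :: u).Pairwise (fun x y => x ≤ y) := (List.pairwise_cons.mp hl).2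
      have hstep : pvNoAdjDups (a :: b :: u) = ((a != b) && pvNoAdjDups (b :: u)) := by
        simp [pvNoAdjDups, List.zip]
      rw [hstep]
      constructor
      · intro h
        rw [Bool.and_eq_true] at h
        have h1 : a ≠ b := by simpa using h.1
        have h2 := (ih htl).mp h.2
        refine List.nodup_cons.mpr ⟨?_, h2⟩
        intro hmem
        rcases List.mem_cons.mp hmem with h | h
        · exact h1 h
        · have : b ≤ a := hbu a h
          exact h1 (le_antisymm hab this)
      · intro h
        have h1 : a ∉ b :: u := (List.nodup_cons.mp h).1
        have h2 : (b :: u).Nodup := (List.nodup_cons.mp h).2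
        rw [Bool.and_eq_true]
        refine ⟨?_, (ih htl).mpr h2⟩
        simp only [bne_iff_ne, ne_eq]
        intro he; exact h1 (he ▸ List.mem_cons_self)

-- ===== VERDICT =====
theorem is_valid_hypothesis_spec : Claim_equal_is_valid_hypothesis := by
  intro hyp _
  unfold Spec_is_valid_hypothesis is_valid_hypothesis is_valid_hypothesis_alt
  rw [pv_loopA_eq]
  have hperm1 := PySem.List.sorted_perm ((hyp.filter (fun p => p.2 ≥ 0)).map Prod.fst) (fun x => x) false
  have hperm2 := PySem.List.sorted_perm ((hyp.filter (fun p => p.2 ≥ 0)).map Prod.snd) (fun x => x) false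
  have hp1 := PySem.List.sorted_pairwise ((hyp.filter (fun p => p.2 ≥ 0)).map Prod.fst) (fun x => x)
  have hp2 := PySem.List.sorted_pairwise ((hyp.filter (fun p => p.2 ≥ 0)).map Prod.snd) (fun x => x)
  rw [Bool.eq_iff_iff]
  simp only [decide_eq_true_eq, Bool.and_eq_true, pvAssigned]
  rw [pv_noAdjDups_iff_nodup _ hp1, pv_noAdjDups_iff_nodup _ hp2,
    hperm1.nodup_iff, hperm2.nodup_iff]
  constructor
  · rintro ⟨h1, -, h2, -⟩; exact ⟨h1, h2⟩
  · rintro ⟨h1, h2⟩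
    refine ⟨h1, ?_, h2, ?_⟩
    · intro t _; simp [PySem.Dict.contains_empty]
    · intro r _; simp [PySem.Set.empty]
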